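-- pv_equiv track=rewrite | github.com/SharkyBamboozle/iVISPAR | src_python/core/models/tmp/action_model2.py | _shape_mapping
-- ===== SOURCE A (Python) =====
-- def _shape_mapping(response: str) -> str:
--     """
--     Replace 2D shape terms with corresponding 3D body names.
--     """
--     shape_map = {
--         "circle": "sphere",
--         "square": "cube",
--         "triangle": "pyramid",
--         "hexagon": "cylinder"
--     }
--     for shape_2d, body_3d in shape_map.items():
--         response = response.replace(shape_2d, body_3d)
--     return response
-- ===== SOURCE B (Python) =====
-- def _shape_mapping(response: str) -> str:
--     """
--     Replace 2D shape terms with corresponding 3D body names,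
--     in a single left-to-right pass: at each position try each 2D key in
--     order; on a match emit the 3D body and skip the key, else copy one char.
--     """
--     table = [("circle", "sphere"), ("square", "cube"),
--              ("triangle", "pyramid"), ("hexagon", "cylinder")]
--     out = []
--     i = 0
--     n = len(response)
--     while i < n:
--         for shape_2d, body_3d in table:
--             if response.startswith(shape_2d, i):
--                 out.append(body_3d)
--                 i += len(shape_2d)
--                 break
--         else:
--             out.append(response[i])
--             i += 1
--     return ''.join(out)
-- ===== Notes on version B (the rewrite author's own statement) =====
-- stated objective: alternative
-- what changed: Four sequential full-string str.replace passes are replaced by one left-to-right scan that at each position tries the shape keys in table order and emits the 3D body or copies the character.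
import Mathlib
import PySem

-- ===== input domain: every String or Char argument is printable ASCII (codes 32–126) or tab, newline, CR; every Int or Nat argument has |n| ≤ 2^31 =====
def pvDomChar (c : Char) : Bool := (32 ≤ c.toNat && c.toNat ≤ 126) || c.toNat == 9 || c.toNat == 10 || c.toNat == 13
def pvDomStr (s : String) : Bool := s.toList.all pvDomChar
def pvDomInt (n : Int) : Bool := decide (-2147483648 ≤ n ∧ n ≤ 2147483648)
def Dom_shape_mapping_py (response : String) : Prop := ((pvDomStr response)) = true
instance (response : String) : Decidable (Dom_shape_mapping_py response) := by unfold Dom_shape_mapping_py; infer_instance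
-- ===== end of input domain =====

-- B replaces A's four sequential full-string replace passes by one left-to-right
-- table-driven scan (alternative decomposition, same asymptotic cost).


-- ===== PORT A =====
-- the dict literal shape_map of A
def pvShapeMapA : PySem.Dict String String :=
  ((((PySem.Dict.empty).insert "circle" "sphere").insert "square" "cube").insert
      "triangle" "pyramid").insert "hexagon" "cylinder"

-- for shape_2d, body_3d in shape_map.items(): response = response.replace(shape_2d, body_3d)
def shape_mapping_py (response : String) : String :=
  pvShapeMapA.items.foldl (fun r p => PySem.Str.replace r p.1 p.2) response

-- ===== PORT B =====
-- B's single left-to-right pass over the characters: at each position try each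
-- key in table order (circle, square, triangle, hexagon = shape_map.items() order);
-- on a match emit the 3D body and skip the key, else copy one character.
def pvScanB : List Char → List Char
  | [] => []
  | c :: t =>
    if ("circle".toList).isPrefixOf (c :: t) then
      "sphere".toList ++ pvScanB (List.drop 6 (c :: t))
    else if ("square".toList).isPrefixOf (c :: t) then
      "cube".toList ++ pvScanB (List.drop 6 (c :: t))
    else if ("triangle".toList).isPrefixOf (c :: t) then
      "pyramid".toList ++ pvScanB (List.drop 8 (c :: t))
    else if ("hexagon".toList).isPrefixOf (c :: t) then
      "cylinder".toList ++ pvScanB (List.drop 7 (c :: t))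
    else c :: pvScanB t
  termination_by l => l.length
  decreasing_by all_goals simp [List.length_drop]

def shape_mapping_py_alt (response : String) : String :=
  String.ofList (pvScanB response.toList)

-- ===== PRECONDITION & SPEC =====
def Spec_shape_mapping_py (response : String) (out : String) : Prop := out = shape_mapping_py_alt response
instance (response : String) (out : String) : Decidable (Spec_shape_mapping_py response out) := by unfold Spec_shape_mapping_py; infer_instance

-- ===== CLAIM (what is proved, stated in full; the proofs are below) =====
def Claim_equal_shape_mapping_py : Prop := ∀ (response : String), Dom_shape_mapping_py response → Spec_shape_mapping_py response (shape_mapping_py response)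

-- ===== LEMMAS AND PROOFS =====

theorem pv_go_eq (old new : List Char) (hold : old ≠ []) :
    ∀ n l acc fuel, List.length l = n → List.length l ≤ fuel →
      PySem.Chars.replace.go old new fuel l acc
        = acc.reverse ++ PySem.Chars.replace l old new := by
  intro n
  induction n using Nat.strong_induction_on with
  | _ n IH =>
    intro l acc fuel hn hf
    have hopos : 1 ≤ old.length := List.length_pos_iff.mpr hold
    cases l with
    | nil =>
      have hr : PySem.Chars.replace ([]:List Char) old new = [] := by
        simp [PySem.Chars.replace, List.isEmpty_iff, hold, PySem.Chars.replace.go]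
      rw [hr]
      cases fuel <;> simp [PySem.Chars.replace.go]
    | cons c t =>
      cases fuel with
      | zero => simp at hf
      | succ f =>
        have hlt : t.length + 1 ≤ f + 1 := by simpa using hf
        have hnn : t.length + 1 = n := by simpa using hn
        have hdlt : (List.drop old.length (c::t)).length < n := by
          simp [List.length_drop]; omega
        have hdle : (List.drop old.length (c::t)).length ≤ f := by
          simp [List.length_drop]; omega
        have htlt : t.length < n := by omega
        have hrw : PySem.Chars.replace (c::t) old new
            = PySem.Chars.replace.go old new (t.length+1) (c::t) [] := by
          simp [PySem.Chars.replace, List.isEmpty_iff, hold]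
        rw [PySem.Chars.replace.go, hrw, PySem.Chars.replace.go]
        by_cases hp : old.isPrefixOf (c::t)
        · rw [if_pos hp, if_pos hp,
            IH _ hdlt _ _ f rfl hdle, IH _ hdlt _ _ t.length rfl (by omega)]
          simp
        · rw [if_neg hp, if_neg hp,
            IH _ htlt _ _ f rfl (by omega), IH _ htlt _ _ t.length rfl le_rfl]
          simp

theorem pv_replace_nil (old new : List Char) (hold : old ≠ []) :
    PySem.Chars.replace [] old new = [] := by
  simp [PySem.Chars.replace, List.isEmpty_iff, hold, PySem.Chars.replace.go]

theorem pv_replace_cons (old new : List Char) (hold : old ≠ []) (c : Char) (t : List Char) :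
    PySem.Chars.replace (c :: t) old new =
      if old.isPrefixOf (c :: t) then
        new ++ PySem.Chars.replace (List.drop old.length (c :: t)) old new
      else c :: PySem.Chars.replace t old new := by
  have hopos : 1 ≤ old.length := List.length_pos_iff.mpr hold
  have hrw : PySem.Chars.replace (c::t) old new
      = PySem.Chars.replace.go old new (t.length+1) (c::t) [] := by
    simp [PySem.Chars.replace, List.isEmpty_iff, hold]
  rw [hrw, PySem.Chars.replace.go]
  by_cases hp : old.isPrefixOf (c::t)
  · rw [if_pos hp, if_pos hp, pv_go_eq old new hold _ _ _ _ rfl (by simp [List.length_drop]; omega)]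
    simp
  · rw [if_neg hp, if_neg hp, pv_go_eq old new hold _ _ _ _ rfl le_rfl]
    simp

theorem pv_replace_head (old new u : List Char) (hold : old ≠ []) :
    PySem.Chars.replace (old ++ u) old new = new ++ PySem.Chars.replace u old new := by
  cases old with
  | nil => exact absurd rfl hold
  | cons a o =>
    rw [List.cons_append, pv_replace_cons _ _ hold]
    have hp : (a :: o).isPrefixOf (a :: (o ++ u)) = true := by
      rw [List.isPrefixOf_iff_prefix]
      exact ⟨u, by simp⟩
    rw [if_pos hp]
    have : List.drop (a :: o).length (a :: (o ++ u)) = u := by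
      simp
    rw [this]

theorem pv_prefix_append_cases {α : Type} (p a x : List α) (h : p <+: a ++ x) :
    p <+: a ∨ a <+: p := by
  rcases Nat.le_total p.length a.length with hle | hle
  · exact Or.inl (List.prefix_of_prefix_length_le h (a.prefix_append x) hle)
  · exact Or.inr (List.prefix_of_prefix_length_le (a.prefix_append x) h hle)

theorem pv_distrib (old new pre : List Char) (hold : old ≠ [])
    (h : ∀ j, j < pre.length → ¬ old <+: pre.drop j ∧ ¬ pre.drop j <+: old) :
    ∀ x, PySem.Chars.replace (pre ++ x) old new = pre ++ PySem.Chars.replace x old new := by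
  induction pre with
  | nil => intro x; simp
  | cons c p ih =>
    intro x
    have h0 := h 0 (by simp)
    have hnp : ¬ old.isPrefixOf (c :: (p ++ x)) := by
      rw [List.isPrefixOf_iff_prefix]
      intro hpre
      rcases pv_prefix_append_cases old (c :: p) x (by simpa using hpre) with h1 | h2
      · exact h0.1 (by simpa using h1)
      · exact h0.2 (by simpa using h2)
    rw [List.cons_append, pv_replace_cons _ _ hold, if_neg hnp,
      ih (fun j hj => by simpa using h (j+1) (by simpa using Nat.succ_lt_succ hj))]
    simp

theorem pv_pullback (old' new' : List Char) (hold : old' ≠ []) (h0 : Char)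
    (hn : new' = h0 :: new'.tail) :
    ∀ n x p, List.length x = n → h0 ∉ p →
      p <+: PySem.Chars.replace x old' new' → p <+: x := by
  intro n
  induction n using Nat.strong_induction_on with
  | _ n IH =>
    intro x p hx hnp hpre
    have hopos : 1 ≤ old'.length := List.length_pos_iff.mpr hold
    cases x with
    | nil =>
      rw [pv_replace_nil _ _ hold] at hpre
      simpa using hpre
    | cons c t =>
      rw [pv_replace_cons _ _ hold] at hpre
      cases p with
      | nil => simp
      | cons q p' =>
        by_cases hp : old'.isPrefixOf (c :: t)
        · rw [if_pos hp] at hpre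
          exfalso
          rw [hn] at hpre
          rw [List.cons_append, List.cons_prefix_cons] at hpre
          exact hnp (hpre.1 ▸ List.mem_cons_self)
        · rw [if_neg hp] at hpre
          rw [List.cons_prefix_cons] at hpre ⊢
          refine ⟨hpre.1, ?_⟩
          exact IH t.length (by simp at hx; omega) t p' rfl
            (fun hm => hnp (List.mem_cons_of_mem _ hm)) hpre.2

theorem pv_main : ∀ n l, List.length l = n →
    PySem.Chars.replace (PySem.Chars.replace (PySem.Chars.replace
      (PySem.Chars.replace l "circle".toList "sphere".toList)
        "square".toList "cube".toList)
        "triangle".toList "pyramid".toList)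
        "hexagon".toList "cylinder".toList = pvScanB l := by
  intro n
  induction n using Nat.strong_induction_on with
  | _ n IH =>
    intro l hl
    cases l with
    | nil =>
      rw [pv_replace_nil _ _ (by decide), pv_replace_nil _ _ (by decide),
        pv_replace_nil _ _ (by decide), pv_replace_nil _ _ (by decide)]
      simp [pvScanB]
    | cons c t =>
      have hn' : t.length + 1 = n := by simpa using hl
      by_cases h1 : "circle".toList <+: (c :: t)
      · rw [pvScanB]
        simp only [List.isPrefixOf_iff_prefix]
        rw [if_pos h1]
        rw [pv_replace_cons _ _ (by decide) c t, if_pos (List.isPrefixOf_iff_prefix.mpr h1),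
          show ("circle".toList).length = 6 from by decide,
          pv_distrib "square".toList "cube".toList "sphere".toList (by decide) (by decide),
          pv_distrib "triangle".toList "pyramid".toList "sphere".toList (by decide) (by decide),
          pv_distrib "hexagon".toList "cylinder".toList "sphere".toList (by decide) (by decide),
          IH (List.drop 6 (c::t)).length (by simp [List.length_drop]; omega) _ rfl]
      · by_cases h2 : "square".toList <+: (c :: t)
        · rw [pvScanB]
          simp only [List.isPrefixOf_iff_prefix]
          rw [if_neg h1, if_pos h2]
          obtain ⟨u, hu⟩ := h2
          have hulen : u.length < n := by
            have := congrArg List.length hu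
            simp at this; omega
          rw [← hu, show List.drop 6 ("square".toList ++ u) = u from by simp,
            pv_distrib "circle".toList "sphere".toList "square".toList (by decide) (by decide),
            pv_replace_head "square".toList "cube".toList _ (by decide),
            pv_distrib "triangle".toList "pyramid".toList "cube".toList (by decide) (by decide),
            pv_distrib "hexagon".toList "cylinder".toList "cube".toList (by decide) (by decide),
            IH u.length hulen u rfl]
        · by_cases h3 : "triangle".toList <+: (c :: t)
          · rw [pvScanB]
            simp only [List.isPrefixOf_iff_prefix]
            rw [if_neg h1, if_neg h2, if_pos h3]
            obtain ⟨u, hu⟩ := h3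
            have hulen : u.length < n := by
              have := congrArg List.length hu
              simp at this; omega
            rw [← hu, show List.drop 8 ("triangle".toList ++ u) = u from by simp,
              pv_distrib "circle".toList "sphere".toList "triangle".toList (by decide) (by decide),
              pv_distrib "square".toList "cube".toList "triangle".toList (by decide) (by decide),
              pv_replace_head "triangle".toList "pyramid".toList _ (by decide),
              pv_distrib "hexagon".toList "cylinder".toList "pyramid".toList (by decide) (by decide),
              IH u.length hulen u rfl]
          · by_cases h4 : "hexagon".toList <+: (c :: t)
            · rw [pvScanB]
              simp only [List.isPrefixOf_iff_prefix]
              rw [if_neg h1, if_neg h2, if_neg h3, if_pos h4]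
              obtain ⟨u, hu⟩ := h4
              have hulen : u.length < n := by
                have := congrArg List.length hu
                simp at this; omega
              rw [← hu, show List.drop 7 ("hexagon".toList ++ u) = u from by simp,
                pv_distrib "circle".toList "sphere".toList "hexagon".toList (by decide) (by decide),
                pv_distrib "square".toList "cube".toList "hexagon".toList (by decide) (by decide),
                pv_distrib "triangle".toList "pyramid".toList "hexagon".toList (by decide) (by decide),
                pv_replace_head "hexagon".toList "cylinder".toList _ (by decide),
                IH u.length hulen u rfl]
            · rw [pvScanB]
              simp only [List.isPrefixOf_iff_prefix]
              rw [if_neg h1, if_neg h2, if_neg h3, if_neg h4]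
              have hA2 : ¬ ("square".toList <+:
                  c :: PySem.Chars.replace t "circle".toList "sphere".toList) := by
                intro hpre
                rw [show "square".toList = 's' :: "quare".toList from by decide,
                  List.cons_prefix_cons] at hpre
                have hq : "quare".toList <+: t :=
                  pv_pullback "circle".toList "sphere".toList (by decide) 's' (by decide)
                    t.length t _ rfl (by decide) hpre.2
                exact h2 (by
                  rw [show "square".toList = 's' :: "quare".toList from by decide,
                    List.cons_prefix_cons]
                  exact ⟨hpre.1, hq⟩)
              have hA3 : ¬ ("triangle".toList <+:
                  c :: PySem.Chars.replace (PySem.Chars.replace t "circle".toList "sphere".toList)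
                    "square".toList "cube".toList) := by
                intro hpre
                rw [show "triangle".toList = 't' :: "riangle".toList from by decide,
                  List.cons_prefix_cons] at hpre
                have s1 : "riangle".toList <+: PySem.Chars.replace t "circle".toList "sphere".toList :=
                  pv_pullback "square".toList "cube".toList (by decide) 'c' (by decide)
                    _ _ _ rfl (by decide) hpre.2
                have s2 : "riangle".toList <+: t :=
                  pv_pullback "circle".toList "sphere".toList (by decide) 's' (by decide)
                    t.length t _ rfl (by decide) s1
                exact h3 (by
                  rw [show "triangle".toList = 't' :: "riangle".toList from by decide,
                    List.cons_prefix_cons]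
                  exact ⟨hpre.1, s2⟩)
              have hA4 : ¬ ("hexagon".toList <+:
                  c :: PySem.Chars.replace (PySem.Chars.replace
                    (PySem.Chars.replace t "circle".toList "sphere".toList)
                    "square".toList "cube".toList) "triangle".toList "pyramid".toList) := by
                intro hpre
                rw [show "hexagon".toList = 'h' :: "exagon".toList from by decide,
                  List.cons_prefix_cons] at hpre
                have s1 : "exagon".toList <+: PySem.Chars.replace
                    (PySem.Chars.replace t "circle".toList "sphere".toList)
                    "square".toList "cube".toList :=
                  pv_pullback "triangle".toList "pyramid".toList (by decide) 'p' (by decide)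
                    _ _ _ rfl (by decide) hpre.2
                have s2 : "exagon".toList <+: PySem.Chars.replace t "circle".toList "sphere".toList :=
                  pv_pullback "square".toList "cube".toList (by decide) 'c' (by decide)
                    _ _ _ rfl (by decide) s1
                have s3 : "exagon".toList <+: t :=
                  pv_pullback "circle".toList "sphere".toList (by decide) 's' (by decide)
                    t.length t _ rfl (by decide) s2
                exact h4 (by
                  rw [show "hexagon".toList = 'h' :: "exagon".toList from by decide,
                    List.cons_prefix_cons]
                  exact ⟨hpre.1, s3⟩)
              rw [pv_replace_cons _ _ (by decide) c t,
                if_neg (by rw [List.isPrefixOf_iff_prefix]; exact h1),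
                pv_replace_cons "square".toList _ (by decide),
                if_neg (by rw [List.isPrefixOf_iff_prefix]; exact hA2),
                pv_replace_cons "triangle".toList _ (by decide),
                if_neg (by rw [List.isPrefixOf_iff_prefix]; exact hA3),
                pv_replace_cons "hexagon".toList _ (by decide),
                if_neg (by rw [List.isPrefixOf_iff_prefix]; exact hA4),
                IH t.length (by omega) t rfl]

-- ===== VERDICT (by name: the statement is the Claim_ definition above) =====
theorem shape_mapping_py_spec : Claim_equal_shape_mapping_py := by
  intro response _
  unfold Spec_shape_mapping_py shape_mapping_py shape_mapping_py_alt
  have hitems : pvShapeMapA.items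
      = [("circle","sphere"),("square","cube"),("triangle","pyramid"),("hexagon","cylinder")] := by
    decide
  rw [hitems]
  simp only [List.foldl]
  simp only [PySem.Str.replace, String.toList_ofList]
  exact congrArg String.ofList (pv_main _ response.toList rfl)
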